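-- pv_equiv track=rewrite | github.com/dvsang25174600112-xeko/25174600112_-V-N-S-NG_19A2_Ca-Chi-u | 25174600112_Đỗ Văn Sáng.py | tinh_S
-- ===== SOURCE A (Python) =====
-- def tinh_S(n):
--     tong = 0
--     for i in range(1, n + 1):
--         tong_con = 0
--         for j in range(1, i + 1):
--             tong_con = tong_con + j
--         tong = tong + tong_con
--     return tong
-- ===== SOURCE B (Python) =====
-- def tinh_S(n):
--     if n < 0:
--         return 0
--     return n * (n + 1) * (n + 2) // 6
-- ===== Notes on version B (the rewrite author's own statement) =====
-- stated objective: faster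
-- what changed: Replaced the nested accumulation loops by the closed form n(n+1)(n+2)//6 for the sum of the first n triangular numbers (0 for negative n).
import Mathlib
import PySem

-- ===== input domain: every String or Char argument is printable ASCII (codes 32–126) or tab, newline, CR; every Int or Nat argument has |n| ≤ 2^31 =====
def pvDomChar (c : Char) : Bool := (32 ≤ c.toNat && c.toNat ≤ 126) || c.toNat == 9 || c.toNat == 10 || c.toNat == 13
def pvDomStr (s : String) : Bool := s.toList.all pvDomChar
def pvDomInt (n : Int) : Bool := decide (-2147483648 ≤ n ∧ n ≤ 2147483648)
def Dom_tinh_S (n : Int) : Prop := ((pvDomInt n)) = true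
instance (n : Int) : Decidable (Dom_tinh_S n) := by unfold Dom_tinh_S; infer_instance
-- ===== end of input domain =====

-- B computes the same value by the closed form n(n+1)(n+2)//6 instead of A's nested loops (asymptotically faster).

-- ===== PORT A =====
def tinh_S (n : Int) : Int :=
  (PySem.List.pyRange 1 (n + 1) 1).foldl
    (fun tong i =>
      tong + (PySem.List.pyRange 1 (i + 1) 1).foldl (fun tong_con j => tong_con + j) 0)
    0

-- ===== PORT B =====
def tinh_S_alt (n : Int) : Int :=
  if n < 0 then 0 else PySem.Int.floordiv (n * (n + 1) * (n + 2)) 6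

-- ===== PRECONDITION & SPEC =====
def Spec_tinh_S (n : Int) (out : Int) : Prop := out = tinh_S_alt n
instance (n : Int) (out : Int) : Decidable (Spec_tinh_S n out) := by unfold Spec_tinh_S; infer_instance

-- ===== CLAIM (what is proved, stated in full; the proofs are below) =====
def Claim_equal_tinh_S : Prop := ∀ (n : Int), Dom_tinh_S n → Spec_tinh_S n (tinh_S n)

-- ===== LEMMAS AND PROOFS =====

-- inner loop: twice the sum 1 + … + k
theorem pv_inner (k : Nat) :
    2 * (PySem.List.pyRange 1 ((k : Int) + 1) 1).foldl (fun tong_con j => tong_con + j) 0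
      = (k : Int) * (k + 1) := by
  induction k with
  | zero => simp
  | succ m ih =>
    have h : PySem.List.pyRange 1 ((m : Int) + 1 + 1) 1
        = PySem.List.pyRange 1 ((m : Int) + 1) 1 ++ [(m : Int) + 1] := by
      have := PySem.List.pyRange_one_succ_right (a := 1) (b := (m : Int) + 1) (by omega)
      simpa using this
    push_cast
    rw [show ((m : Int) + 1 + 1) = ((m : Int) + 1 + 1) from rfl, h, List.foldl_append]
    simp only [List.foldl_cons, List.foldl_nil]
    linarith [ih]

-- outer loop: six times A's result
theorem pv_outer (k : Nat) :
    6 * tinh_S (k : Int) = (k : Int) * (k + 1) * (k + 2) := by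
  induction k with
  | zero =>
    simp [tinh_S]
  | succ m ih =>
    have h : PySem.List.pyRange 1 ((m : Int) + 1 + 1) 1
        = PySem.List.pyRange 1 ((m : Int) + 1) 1 ++ [(m : Int) + 1] := by
      have := PySem.List.pyRange_one_succ_right (a := 1) (b := (m : Int) + 1) (by omega)
      simpa using this
    unfold tinh_S at ih ⊢
    push_cast
    rw [h, List.foldl_append]
    simp only [List.foldl_cons, List.foldl_nil]
    have hin := pv_inner (m + 1)
    push_cast at hin
    nlinarith [ih, hin]

-- ===== VERDICT (by name: the statement is the Claim_ definition above) =====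
theorem tinh_S_spec : Claim_equal_tinh_S := by
  intro n _
  unfold Spec_tinh_S tinh_S_alt
  split_ifs with hn
  · -- n < 0: A's outer range is empty
    simp [tinh_S, PySem.List.pyRange_one_eq_nil (by omega : n + 1 ≤ 1)]
  · -- 0 ≤ n: closed form
    rw [not_lt] at hn
    obtain ⟨k, rfl⟩ : ∃ k : Nat, n = (k : Int) := ⟨n.toNat, (Int.toNat_of_nonneg hn).symm⟩
    have h6 := pv_outer k
    rw [PySem.Int.floordiv_eq_ediv_of_pos (by omega)]
    omega
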